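-- pv_equiv track=rewrite | github.com/Kingewor9/ProjectCPC | backend/app.py | find_best_duration
-- ===== SOURCE A (Python) =====
-- def find_best_duration(channel_doc, requested_hours):
--     try:
--         # channel may store durationPrices or price_settings
--         durations_map = channel_doc.get('durationPrices') or channel_doc.get('price_settings') or {}
--         durations = []
--         for k in durations_map.keys():
--             try:
--                 durations.append(int(k))
--             except Exception:
--                 continue
--         if not durations:
--             return int(requested_hours or 8)
--         durations = sorted(set(durations))
--         req = int(requested_hours or 0)
--         if req in durations:
--             return req
--         # find highest duration <= requested
--         lower = [d for d in durations if d <= req]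
--         if lower:
--             return max(lower)
--         # otherwise return the maximum available
--         return max(durations)
--     except Exception:
--         return int(requested_hours or 8)
-- ===== SOURCE B (Python) =====
-- def find_best_duration(channel_doc, requested_hours):
--     # Single pass over the parsed durations with two running accumulators
--     # (largest d <= req, and largest d overall) instead of sorted(set(...)),
--     # a membership test, a filtered list and two max() scans.
--     durations_map = channel_doc.get('durationPrices') or channel_doc.get('price_settings') or {}
--     durations = []
--     for k in durations_map.keys():
--         try:
--             durations.append(int(k))
--         except Exception:
--             continue
--     if not durations:
--         return int(requested_hours or 8)
--     req = int(requested_hours or 0)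
--     best_le = None
--     max_all = None
--     for d in durations:
--         if d <= req and (best_le is None or d > best_le):
--             best_le = d
--         if max_all is None or d > max_all:
--             max_all = d
--     return best_le if best_le is not None else max_all
-- ===== Notes on version B (the rewrite author's own statement) =====
-- stated objective: alternative
-- what changed: Replaces sorted(set(...)) plus a membership test, a filtered list and two max() scans by a single pass over the parsed durations keeping two running accumulators (largest d <= req, largest d overall).
import Mathlib
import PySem

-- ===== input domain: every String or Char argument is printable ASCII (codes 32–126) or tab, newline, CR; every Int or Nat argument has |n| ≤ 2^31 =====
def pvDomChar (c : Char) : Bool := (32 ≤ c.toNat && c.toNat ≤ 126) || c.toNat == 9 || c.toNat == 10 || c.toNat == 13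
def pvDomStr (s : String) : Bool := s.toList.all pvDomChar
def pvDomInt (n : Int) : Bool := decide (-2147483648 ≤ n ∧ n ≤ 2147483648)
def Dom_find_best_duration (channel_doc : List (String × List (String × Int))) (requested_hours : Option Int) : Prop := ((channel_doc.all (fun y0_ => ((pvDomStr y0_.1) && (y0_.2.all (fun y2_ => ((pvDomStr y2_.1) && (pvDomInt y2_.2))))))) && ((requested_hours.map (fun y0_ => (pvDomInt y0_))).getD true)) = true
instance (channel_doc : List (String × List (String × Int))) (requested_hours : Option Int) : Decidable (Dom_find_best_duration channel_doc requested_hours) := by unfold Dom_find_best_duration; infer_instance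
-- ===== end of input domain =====

-- B replaces A's sorted(set(...)) + membership test + filter + two max() scans by one
-- pass over the parsed durations with two running accumulators (objective: alternative).

-- ===== PORT A =====
-- Shared prefix of both Pythons: `channel_doc.get('durationPrices') or channel_doc.get('price_settings') or {}`
def pvDurationsMap (channel_doc : List (String × List (String × Int))) : List (String × Int) :=
  let d : PySem.Dict String (List (String × Int)) := PySem.Dict.mk channel_doc
  let m1 := (d.get? "durationPrices").getD []
  if m1 ≠ [] then m1 else
    let m2 := (d.get? "price_settings").getD []
    if m2 ≠ [] then m2 else []

-- Shared prefix of both Pythons: the key-parsing loop with try/except int(k)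
def pvParse (m : List (String × Int)) : List Int :=
  m.foldl (fun acc kv =>
    match PySem.Int.ofStr? kv.1 with
    | some n => acc ++ [n]
    | none => acc) []

-- int(requested_hours or 8)
def pvFallback8 (requested_hours : Option Int) : Int :=
  match requested_hours with
  | none => 8
  | some h => if h = 0 then 8 else h

-- int(requested_hours or 0)
def pvReq (requested_hours : Option Int) : Int := requested_hours.getD 0

def find_best_duration (channel_doc : List (String × List (String × Int))) (requested_hours : Option Int) : Int :=
  let durations := pvParse (pvDurationsMap channel_doc)
  if durations = [] then pvFallback8 requested_hours
  else
    let ds := PySem.List.sorted (PySem.Set.ofList durations) (fun x => x) false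
    let req := pvReq requested_hours
    if req ∈ ds then req
    else
      let lower := ds.filter (fun d => decide (d ≤ req))
      if lower ≠ [] then (PySem.List.max? lower (fun x => x)).getD 0
      else (PySem.List.max? ds (fun x => x)).getD 0

-- ===== PORT B =====
-- one step of B's loop: (best_le, max_all)
def pvHStep (m : Option Int) (d : Int) : Option Int :=
  if m.isNone ∨ m.getD 0 < d then some d else m

def pvLeStep (req : Int) (m : Option Int) (d : Int) : Option Int :=
  if d ≤ req ∧ (m.isNone ∨ m.getD 0 < d) then some d else m

def pvStep (req : Int) (st : Option Int × Option Int) (d : Int) : Option Int × Option Int :=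
  (pvLeStep req st.1 d, pvHStep st.2 d)

def find_best_duration_alt (channel_doc : List (String × List (String × Int))) (requested_hours : Option Int) : Int :=
  let durations := pvParse (pvDurationsMap channel_doc)
  if durations = [] then pvFallback8 requested_hours
  else
    let req := pvReq requested_hours
    let st := durations.foldl (pvStep req) (none, none)
    match st.1 with
    | some b => b
    | none => st.2.getD 0

-- ===== PRECONDITION & SPEC =====
def Spec_find_best_duration (channel_doc : List (String × List (String × Int))) (requested_hours : Option Int) (out : Int) : Prop := out = find_best_duration_alt channel_doc requested_hours
instance (channel_doc : List (String × List (String × Int))) (requested_hours : Option Int) (out : Int) : Decidable (Spec_find_best_duration channel_doc requested_hours out) := by unfold Spec_find_best_duration; infer_instance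

-- ===== CLAIM (what is proved, stated in full; the proofs are below) =====
def Claim_equal_find_best_duration : Prop := ∀ (channel_doc : List (String × List (String × Int))) (requested_hours : Option Int), Dom_find_best_duration channel_doc requested_hours → Spec_find_best_duration channel_doc requested_hours (find_best_duration channel_doc requested_hours)

-- ===== LEMMAS AND PROOFS =====

theorem pvHStep_some (a d : Int) : pvHStep (some a) d = some (max a d) := by
  unfold pvHStep
  by_cases h : a < d
  · simp [h, max_eq_right h.le]
  · simp [h, max_eq_left (le_of_not_gt h)]

theorem foldl_pvHStep_some (l : List Int) (a : Int) :
    l.foldl pvHStep (some a) = some (l.foldl max a) := by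
  induction l generalizing a with
  | nil => rfl
  | cons x t ih => simp [List.foldl_cons, pvHStep_some, ih]

theorem foldl_pvHStep_none (l : List Int) :
    l.foldl pvHStep none = PySem.List.max? l (fun x => x) := by
  cases l with
  | nil => rfl
  | cons x t =>
      have h1 : pvHStep none x = some x := by simp [pvHStep]
      simp [List.foldl_cons, h1, foldl_pvHStep_some, PySem.List.max?_id_cons]

theorem pvLeStep_eq (req : Int) (m : Option Int) (d : Int) :
    pvLeStep req m d = if d ≤ req then pvHStep m d else m := by
  unfold pvLeStep pvHStep
  by_cases h : d ≤ req <;> simp [h]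

theorem foldl_pvLeStep (req : Int) (l : List Int) (b : Option Int) :
    l.foldl (pvLeStep req) b = (l.filter (fun d => decide (d ≤ req))).foldl pvHStep b := by
  induction l generalizing b with
  | nil => rfl
  | cons x t ih =>
      by_cases h : x ≤ req <;>
        simp [List.foldl_cons, h, pvLeStep_eq, ih]

theorem max?_eq_of_mem_iff (l1 l2 : List Int) (h : ∀ x : Int, x ∈ l1 ↔ x ∈ l2) :
    PySem.List.max? l1 (fun x => x) = PySem.List.max? l2 (fun x => x) := by
  cases h1 : PySem.List.max? l1 (fun x => x) with
  | none =>
      have hl1 : l1 = [] := (PySem.List.max?_eq_none_iff _ _).mp h1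
      have hl2 : l2 = [] := by
        cases l2 with
        | nil => rfl
        | cons y t =>
            exact absurd ((h y).mpr (List.mem_cons_self)) (by simp [hl1])
      simp [hl2, PySem.List.max?]
  | some m1 =>
      cases h2 : PySem.List.max? l2 (fun x => x) with
      | none =>
          have hl2 : l2 = [] := (PySem.List.max?_eq_none_iff _ _).mp h2
          have hm : m1 ∈ l1 := PySem.List.max?_mem h1
          exact absurd ((h m1).mp hm) (by simp [hl2])
      | some m2 =>
          have hm1 : m1 ∈ l1 := PySem.List.max?_mem h1
          have hm2 : m2 ∈ l2 := PySem.List.max?_mem h2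
          have h12 : m1 ≤ m2 := PySem.List.max?_isMax h2 m1 ((h m1).mp hm1)
          have h21 : m2 ≤ m1 := PySem.List.max?_isMax h1 m2 ((h m2).mpr hm2)
          exact congrArg some (le_antisymm h12 h21)

-- the core computation after the shared prefix agrees
theorem core_eq (l : List Int) (req : Int) :
    (let ds := PySem.List.sorted (PySem.Set.ofList l) (fun x => x) false
     if req ∈ ds then req
     else
       let lower := ds.filter (fun d => decide (d ≤ req))
       if lower ≠ [] then (PySem.List.max? lower (fun x => x)).getD 0
       else (PySem.List.max? ds (fun x => x)).getD 0) =
    (let st := l.foldl (pvStep req) (none, none)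
     match st.1 with
     | some b => b
     | none => st.2.getD 0) := by
  -- rewrite B's fold
  have hfold : l.foldl (pvStep req) (none, none) =
      (PySem.List.max? (l.filter (fun d => decide (d ≤ req))) (fun x => x),
       PySem.List.max? l (fun x => x)) := by
    have := PySem.List.foldl_prod_mk (f := pvLeStep req) (g := pvHStep) l none none
    calc l.foldl (pvStep req) (none, none)
        = l.foldl (fun (s : Option Int × Option Int) e => (pvLeStep req s.1 e, pvHStep s.2 e)) (none, none) := rfl
      _ = (l.foldl (pvLeStep req) none, l.foldl pvHStep none) := this
      _ = _ := by rw [foldl_pvLeStep, foldl_pvHStep_none, foldl_pvHStep_none]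
  -- membership transfer
  have hmem : ∀ x : Int, x ∈ PySem.List.sorted (PySem.Set.ofList l) (fun y => y) false ↔ x ∈ l := by
    intro x
    rw [PySem.List.mem_sorted, PySem.Set.mem_ofList]
  have hfmem : ∀ x : Int,
      x ∈ (PySem.List.sorted (PySem.Set.ofList l) (fun y => y) false).filter (fun d => decide (d ≤ req)) ↔
      x ∈ l.filter (fun d => decide (d ≤ req)) := by
    intro x
    simp [List.mem_filter, hmem]
  simp only [hfold]
  by_cases hreq : req ∈ PySem.List.sorted (PySem.Set.ofList l) (fun x => x) false
  · -- req is among the durations: B's best_le is exactly req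
    have hreql : req ∈ l := (hmem req).mp hreq
    have hreqf : req ∈ l.filter (fun d => decide (d ≤ req)) := by
      simp [List.mem_filter, hreql]
    cases hmax : PySem.List.max? (l.filter (fun d => decide (d ≤ req))) (fun x => x) with
    | none =>
        have : l.filter (fun d => decide (d ≤ req)) = [] := (PySem.List.max?_eq_none_iff _ _).mp hmax
        simp [this] at hreqf
    | some m =>
        have hm1 : m ∈ l.filter (fun d => decide (d ≤ req)) := PySem.List.max?_mem hmax
        have hmle : m ≤ req := by
          have := List.mem_filter.mp hm1
          simpa using this.2
        have hreqm : req ≤ m := PySem.List.max?_isMax hmax req hreqf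
        have : m = req := le_antisymm hmle hreqm
        simp [hreq, this]
  · simp only [if_neg hreq]
    by_cases hlow : (PySem.List.sorted (PySem.Set.ofList l) (fun x => x) false).filter (fun d => decide (d ≤ req)) ≠ []
    · -- some duration ≤ req exists
      have hfl : l.filter (fun d => decide (d ≤ req)) ≠ [] := by
        intro hnil
        rcases List.exists_mem_of_ne_nil _ hlow with ⟨y, hy⟩
        have := (hfmem y).mp hy
        simp [hnil] at this
      have heq := max?_eq_of_mem_iff _ _ hfmem
      cases hmax : PySem.List.max? (l.filter (fun d => decide (d ≤ req))) (fun x => x) with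
      | none => exact absurd ((PySem.List.max?_eq_none_iff _ _).mp hmax) hfl
      | some m => simp [hlow, heq, hmax]
    · -- no duration ≤ req: B's best_le stays none, both take the overall max
      have hlow' : (PySem.List.sorted (PySem.Set.ofList l) (fun x => x) false).filter (fun d => decide (d ≤ req)) = [] := not_not.mp hlow
      have hfl : l.filter (fun d => decide (d ≤ req)) = [] := by
        rcases hq : l.filter (fun d => decide (d ≤ req)) with _ | ⟨y, t⟩
        · rfl
        · have : y ∈ l.filter (fun d => decide (d ≤ req)) := by simp [hq]
          have := (hfmem y).mpr this
          simp [hlow'] at this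
      have hmaxnone : PySem.List.max? (l.filter (fun d => decide (d ≤ req))) (fun x => x) = none := by
        simp [hfl, PySem.List.max?]
      have heq := max?_eq_of_mem_iff _ _ hmem
      simp [hlow', hmaxnone, heq]

-- ===== VERDICT (by name: the statement is the Claim_ definition above) =====
theorem find_best_duration_spec : Claim_equal_find_best_duration := by
  intro channel_doc requested_hours _
  unfold Spec_find_best_duration find_best_duration find_best_duration_alt
  by_cases hnil : pvParse (pvDurationsMap channel_doc) = []
  · simp [hnil]
  · simp only [if_neg hnil]
    exact core_eq _ (pvReq requested_hours)
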